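-- pv_equiv track=rewrite | github.com/BenKelly-Data/Mastermind | Mastermind Game and Solver.py | find_close
-- ===== SOURCE A (Python) =====
-- def remove_correct(actual, guess):
--     #Removes all correct matches from two "rows"
--     actual2 = [a for (a, b) in zip(actual, guess) if a != b]
--     guess2 = [b for (a, b) in zip(actual, guess) if a != b]
--     return actual2, guess2
--
-- def find_close(actual, guess):
--     #Finds the sum of all close matches
--     actual, guess = remove_correct(actual, guess)
--
--     close = 0
--     for possible in guess:
--         if possible in actual:
--             del actual[actual.index(possible)]
--             close += 1
--     return close
-- ===== SOURCE B (Python) =====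
-- def find_close(actual, guess):
--     n = min(len(actual), len(guess))
--     a = actual[:n]
--     g = guess[:n]
--     ca = {}
--     for x in a:
--         ca[x] = ca.get(x, 0) + 1
--     cg = {}
--     for x in g:
--         cg[x] = cg.get(x, 0) + 1
--     total = 0
--     for k, v in ca.items():
--         total += min(v, cg.get(k, 0))
--     exact = 0
--     for x, y in zip(a, g):
--         if x == y:
--             exact += 1
--     return total - exact
-- ===== Notes on version B (the rewrite author's own statement) =====
-- stated objective: faster
-- what changed: A filters out exact matches and then, for each remaining guess peg, scans and deletes from the remaining actual pegs (quadratic); B builds one hash counter per truncated list and returns the sum of per-colour minimum counts minus the number of exact positional matches, with no filtering or deletion.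
import Mathlib
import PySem

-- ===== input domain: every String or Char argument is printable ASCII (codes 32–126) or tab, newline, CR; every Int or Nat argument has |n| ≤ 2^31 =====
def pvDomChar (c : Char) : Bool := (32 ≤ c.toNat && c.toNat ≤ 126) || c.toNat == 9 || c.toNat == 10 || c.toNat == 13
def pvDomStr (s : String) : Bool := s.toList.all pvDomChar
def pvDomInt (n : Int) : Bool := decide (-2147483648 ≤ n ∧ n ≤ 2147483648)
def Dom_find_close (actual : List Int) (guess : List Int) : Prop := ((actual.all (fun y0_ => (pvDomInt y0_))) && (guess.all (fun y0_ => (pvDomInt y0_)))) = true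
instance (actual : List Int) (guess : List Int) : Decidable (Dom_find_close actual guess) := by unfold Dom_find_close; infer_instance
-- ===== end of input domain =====

-- B replaces A's quadratic remove-and-scan matching loop by counting: total per-color
-- matches (dict counters over the truncated lists) minus exact positional matches.
-- ===== PORT A =====
def find_close (actual : List Int) (guess : List Int) : Int :=
  let actual2 := ((actual.zip guess).filter (fun p => p.1 != p.2)).map (fun p => p.1)
  let guess2  := ((actual.zip guess).filter (fun p => p.1 != p.2)).map (fun p => p.2)
  let st := guess2.foldl (fun (st : List Int × Int) possible =>
      if possible ∈ st.1 then ((PySem.List.remove? st.1 possible).getD st.1, st.2 + 1)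
      else st) (actual2, (0 : Int))
  st.2

-- ===== PORT B =====
def find_close_alt (actual : List Int) (guess : List Int) : Int :=
  let n : Int := min (actual.length : Int) (guess.length : Int)
  let a := PySem.List.slice actual none (some n)
  let g := PySem.List.slice guess none (some n)
  let ca := a.foldl (fun d x => d.insert x (d.getD x 0 + 1)) (PySem.Dict.empty : PySem.Dict Int Int)
  let cg := g.foldl (fun d x => d.insert x (d.getD x 0 + 1)) (PySem.Dict.empty : PySem.Dict Int Int)
  let total := ca.items.foldl (fun acc kv => acc + min kv.2 (cg.getD kv.1 0)) (0 : Int)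
  let exact := (a.zip g).foldl (fun acc p => if p.1 = p.2 then acc + 1 else acc) (0 : Int)
  total - exact

-- ===== PRECONDITION & SPEC =====
def Spec_find_close (actual : List Int) (guess : List Int) (out : Int) : Prop := out = find_close_alt actual guess
instance (actual : List Int) (guess : List Int) (out : Int) : Decidable (Spec_find_close actual guess out) := by unfold Spec_find_close; infer_instance

-- ===== CLAIM (what is proved, stated in full; the proofs are below) =====
def Claim_equal_find_close : Prop := ∀ (actual : List Int) (guess : List Int), Dom_find_close actual guess → Spec_find_close actual guess (find_close actual guess)

-- ===== LEMMAS AND PROOFS =====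

-- Multiset: intersecting with a cons on the right, by cases on membership.
lemma inter_cons_right_of_mem {s t : Multiset Int} {x : Int} (h : x ∈ s) :
    s ∩ (x ::ₘ t) = x ::ₘ (s.erase x ∩ t) := by
  ext a
  by_cases hax : a = x
  · subst hax
    have h1 : 1 ≤ s.count a := Multiset.one_le_count_iff_mem.mpr h
    simp [Multiset.count_inter, Multiset.count_cons, Multiset.count_erase_self]
    omega
  · simp [Multiset.count_inter, Multiset.count_cons, hax,
      Multiset.count_erase_of_ne hax]

lemma inter_cons_right_of_not_mem {s t : Multiset Int} {x : Int} (h : x ∉ s) :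
    s ∩ (x ::ₘ t) = s ∩ t := by
  ext a
  by_cases hax : a = x
  · subst hax
    have h0 : s.count a = 0 := Multiset.count_eq_zero.mpr h
    simp [Multiset.count_inter, Multiset.count_cons, h0]
  · simp [Multiset.count_inter, Multiset.count_cons, hax]

-- A's matching loop computes the size of the multiset intersection.
lemma loop_eq_inter_card (gs : List Int) : ∀ (acts : List Int) (c : Int),
    (gs.foldl (fun (st : List Int × Int) possible =>
      if possible ∈ st.1 then ((PySem.List.remove? st.1 possible).getD st.1, st.2 + 1)
      else st) (acts, c)).2
      = c + (((acts : Multiset Int) ∩ (gs : Multiset Int)).card : Int) := by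
  induction gs with
  | nil => intro acts c; simp
  | cons x gs ih =>
    intro acts c
    by_cases hx : x ∈ acts
    · rw [List.foldl_cons]
      have hrem : (PySem.List.remove? acts x).getD acts = acts.erase x := by
        rw [PySem.List.remove?_eq_some_erase _ _ hx]; rfl
      simp only [hx, if_pos, hrem]
      rw [ih]
      have hms : (acts : Multiset Int) ∩ ((x :: gs : List Int) : Multiset Int)
          = x ::ₘ (((acts.erase x : List Int) : Multiset Int) ∩ (gs : Multiset Int)) := by
        rw [← Multiset.cons_coe, inter_cons_right_of_mem (by simpa using hx),
          Multiset.coe_erase]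
      rw [hms, Multiset.card_cons]
      push_cast
      ring
    · rw [List.foldl_cons]
      simp only [hx, if_neg, if_false]
      rw [ih]
      have : (acts : Multiset Int) ∩ ((x :: gs : List Int) : Multiset Int)
          = (acts : Multiset Int) ∩ (gs : Multiset Int) := by
        rw [← Multiset.cons_coe, inter_cons_right_of_not_mem (by simpa using hx)]
      rw [this]

-- Size of a multiset intersection of two lists as a sum of per-colour minima.
lemma inter_card_eq_sum (u v : List Int) (T : Finset Int) (hT : ∀ x ∈ u, x ∈ T) :
    ((u : Multiset Int) ∩ (v : Multiset Int)).card
      = ∑ k ∈ T, min (u.count k) (v.count k) := by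
  have hsub : ((u : Multiset Int) ∩ (v : Multiset Int)).toFinset ⊆ T := by
    intro x hx
    have hxu : x ∈ u := by
      have := Multiset.mem_toFinset.mp hx
      exact Multiset.mem_coe.mp (Multiset.mem_inter.mp this).1
    exact hT x hxu
  calc ((u : Multiset Int) ∩ (v : Multiset Int)).card
      = ∑ k ∈ ((u : Multiset Int) ∩ (v : Multiset Int)).toFinset,
          ((u : Multiset Int) ∩ (v : Multiset Int)).count k :=
        (Multiset.toFinset_sum_count_eq _).symm
    _ = ∑ k ∈ T, ((u : Multiset Int) ∩ (v : Multiset Int)).count k := by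
        refine Finset.sum_subset hsub ?_
        intro x _ hx
        exact Multiset.count_eq_zero.mpr (fun hmem => hx (Multiset.mem_toFinset.mpr hmem))
    _ = ∑ k ∈ T, min (u.count k) (v.count k) := by
        refine Finset.sum_congr rfl ?_
        intro k _
        simp [Multiset.count_inter]

-- Per colour: count in the unfiltered column = count in the filtered column + equal pairs of that colour.
lemma count_fst_split (ps : List (Int × Int)) (k : Int) :
    (ps.map Prod.fst).count k
      = ((ps.filter (fun p => p.1 != p.2)).map Prod.fst).count k
        + ps.countP (fun p => p.1 == p.2 && p.1 == k) := by
  induction ps with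
  | nil => simp
  | cons p ps ih =>
    obtain ⟨x, y⟩ := p
    by_cases h : x = y
    · subst h
      by_cases hk : x = k
      · subst hk
        simp [List.filter_cons, List.countP_cons, List.count_cons, ih]
        omega
      · simp [List.filter_cons, List.countP_cons, List.count_cons, hk, Ne.symm hk, ih]
    · by_cases hk : x = k
      · subst hk
        simp [List.filter_cons, List.countP_cons, List.count_cons, h, ih]
        omega
      · simp [List.filter_cons, List.countP_cons, List.count_cons, h, hk, Ne.symm hk, ih]

lemma count_snd_split (ps : List (Int × Int)) (k : Int) :
    (ps.map Prod.snd).count k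
      = ((ps.filter (fun p => p.1 != p.2)).map Prod.snd).count k
        + ps.countP (fun p => p.1 == p.2 && p.1 == k) := by
  induction ps with
  | nil => simp
  | cons p ps ih =>
    obtain ⟨x, y⟩ := p
    by_cases h : x = y
    · subst h
      by_cases hk : x = k
      · subst hk
        simp [List.filter_cons, List.countP_cons, List.count_cons, ih]
        omega
      · simp [List.filter_cons, List.countP_cons, List.count_cons, hk, Ne.symm hk, ih]
    · by_cases hk : y = k
      · subst hk
        simp [List.filter_cons, List.countP_cons, List.count_cons, h, ih]
        omega
      · simp [List.filter_cons, List.countP_cons, List.count_cons, h, hk, Ne.symm hk, ih]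

-- Summing the per-colour equal-pair counts over all colours gives the number of equal pairs.
lemma sum_eqc (ps : List (Int × Int)) (T : Finset Int) (hT : ∀ p ∈ ps, p.1 ∈ T) :
    ∑ k ∈ T, ps.countP (fun p => p.1 == p.2 && p.1 == k)
      = ps.countP (fun p => p.1 == p.2) := by
  induction ps with
  | nil => simp
  | cons p ps ih =>
    have hp : p.1 ∈ T := hT p (List.mem_cons_self ..)
    have htl : ∀ q ∈ ps, q.1 ∈ T := fun q hq => hT q (List.mem_cons_of_mem _ hq)
    simp only [List.countP_cons]
    rw [Finset.sum_add_distrib, ih htl]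
    by_cases h : p.1 = p.2
    · have : ∑ k ∈ T, (if (p.1 == p.2 && p.1 == k) = true then 1 else 0)
          = ∑ k ∈ T, (if p.1 = k then 1 else 0) := by
        refine Finset.sum_congr rfl ?_
        intro k _
        simp [h]
      rw [this, Finset.sum_ite_eq T p.1 (fun _ => 1)]
      have hp2 : p.2 ∈ T := h ▸ hp
      simp [h, hp, hp2]
    · have : ∑ k ∈ T, (if (p.1 == p.2 && p.1 == k) = true then 1 else 0)
          = ∑ k ∈ T, 0 := by
        refine Finset.sum_congr rfl ?_
        intro k _
        simp [h]
      rw [this]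
      simp [h]

-- The central counting identity: total per-colour matches = close matches + exact matches.
lemma key_lemma (ps : List (Int × Int)) (T : Finset Int) (hT : ∀ p ∈ ps, p.1 ∈ T) :
    ∑ k ∈ T, min ((ps.map Prod.fst).count k) ((ps.map Prod.snd).count k)
      = ((((ps.filter (fun p => p.1 != p.2)).map Prod.fst : List Int) : Multiset Int)
          ∩ (((ps.filter (fun p => p.1 != p.2)).map Prod.snd : List Int) : Multiset Int)).card
        + ps.countP (fun p => p.1 == p.2) := by
  have hT' : ∀ x ∈ (ps.filter (fun p => p.1 != p.2)).map Prod.fst, x ∈ T := by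
    intro x hx
    rcases List.mem_map.mp hx with ⟨p, hp, rfl⟩
    exact hT p (List.mem_of_mem_filter hp)
  rw [inter_card_eq_sum _ _ T hT', ← sum_eqc ps T hT, ← Finset.sum_add_distrib]
  refine Finset.sum_congr rfl ?_
  intro k _
  rw [count_fst_split, count_snd_split, Nat.add_min_add_right]

-- The two truncated columns, zipped, are exactly zip of the full lists.
lemma take_zip_take (actual guess : List Int) :
    (actual.take (min actual.length guess.length)).zip
      (guess.take (min actual.length guess.length)) = actual.zip guess := by
  show List.zipWith Prod.mk _ _ = List.zipWith Prod.mk actual guess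
  rw [← List.take_zipWith]
  exact List.take_of_length_le (by simp)

-- ===== VERDICT (by name: the statement is the Claim_ definition above) =====
theorem find_close_spec : Claim_equal_find_close := by
  intro actual guess _
  unfold Spec_find_close find_close find_close_alt
  simp only []
  rw [loop_eq_inter_card]
  rw [show (fun p : Int × Int => p.1) = (Prod.fst : Int × Int → Int) from rfl,
      show (fun p : Int × Int => p.2) = (Prod.snd : Int × Int → Int) from rfl]
  -- B side: slices are takes
  have hn : min ((actual.length : Int)) ((guess.length : Int))
      = ((min actual.length guess.length : Nat) : Int) := by push_cast; rfl
  rw [hn, PySem.List.slice_to_natCast, PySem.List.slice_to_natCast]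
  set m : Nat := min actual.length guess.length with hm
  set a : List Int := actual.take m with ha0
  set g : List Int := guess.take m with hg0
  have hzip : a.zip g = actual.zip guess := take_zip_take actual guess
  set ps : List (Int × Int) := actual.zip guess with hps
  have hlen : a.length = m ∧ g.length = m := by
    constructor <;> simp [ha0, hg0, hm]
  have ha : ps.map Prod.fst = a := by
    rw [← hzip]; exact List.map_fst_zip (by omega)
  have hg : ps.map Prod.snd = g := by
    rw [← hzip]; exact List.map_snd_zip (by omega)
  rw [PySem.Dict.foldl_insert_getD_add_one_eq_counter,
      PySem.Dict.foldl_insert_getD_add_one_eq_counter]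
  rw [PySem.List.foldl_add (g := fun kv : Int × Int => min kv.2 ((PySem.Dict.counter g).getD kv.1 0))]
  rw [PySem.Dict.items_counter, List.map_map]
  rw [PySem.List.foldl_ite_add_one (p := fun p : Int × Int => p.1 = p.2)]
  rw [hzip]
  -- the colour set
  set T : Finset Int := (PySem.Set.ofList a).toFinset with hTdef
  have hsum : ((PySem.Set.ofList a).map
        ((fun kv : Int × Int => min kv.2 ((PySem.Dict.counter g).getD kv.1 0)) ∘
          (fun k => (k, (a.count k : Int))))).sum
      = ∑ k ∈ T, min ((a.count k : Int)) ((g.count k : Int)) := by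
    rw [hTdef, ← List.sum_toFinset _ (PySem.Set.nodup_ofList a)]
    refine Finset.sum_congr rfl ?_
    intro k _
    simp [PySem.Dict.getD_counter]
  rw [hsum]
  have hcount : ps.countP (fun x => decide (x.1 = x.2)) = ps.countP (fun p => p.1 == p.2) := by
    refine List.countP_congr ?_
    intro p _
    simp
  have hT : ∀ p ∈ ps, p.1 ∈ T := by
    intro p hp
    have : p.1 ∈ a := ha ▸ List.mem_map_of_mem hp
    simp only [hTdef, List.mem_toFinset]; simpa [pysem] using this
  have key := key_lemma ps T hT
  rw [ha, hg] at key
  have keyZ : (∑ k ∈ T, min ((a.count k : Int)) ((g.count k : Int)))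
      = ((((ps.filter (fun p => p.1 != p.2)).map Prod.fst : List Int) : Multiset Int)
          ∩ (((ps.filter (fun p => p.1 != p.2)).map Prod.snd : List Int) : Multiset Int)).card
        + (ps.countP (fun p => p.1 == p.2) : Int) := by
    have := congrArg (fun n : Nat => (n : Int)) key
    push_cast at this
    simpa using this
  rw [hcount]
  omega
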